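-- pv_equiv track=rewrite | github.com/malstr0em/MinMiss | util.py | binpacking_k
-- ===== SOURCE A (Python) =====
-- def binpacking_k(partition,k,c):
--     bins=[]
--     for _ in range(k):
--         bins.append([])
--     for s in partition:
--         smallest = 0
--         for b in range(k-1):
--             if len(bins[b+1])<len(bins[smallest]):
--                 smallest=b+1
--         bins[smallest]+=s
--     return bins
-- ===== SOURCE B (Python) =====
-- def _insert_sorted(order, item):
--     lo = 0
--     while lo < len(order) and order[lo] < item:
--         lo += 1
--     order.insert(lo, item)
--
-- def binpacking_k(partition, k, c):
--     bins = [[] for _ in range(k)]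
--     # ascending list of (current length, bin index); front = bin to fill next
--     order = [(0, i) for i in range(k)]
--     for s in partition:
--         ln, i = order.pop(0)
--         bins[i] = bins[i] + list(s)
--         _insert_sorted(order, (ln + len(s), i))
--     return bins
-- ===== Notes on version B (the rewrite author's own statement) =====
-- stated objective: alternative
-- what changed: Instead of rescanning all k bins' lengths for every element, B maintains an ascending list of (length, index) pairs, pops the front (the shortest bin, lowest index first) and reinserts the updated pair.
import Mathlib
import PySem

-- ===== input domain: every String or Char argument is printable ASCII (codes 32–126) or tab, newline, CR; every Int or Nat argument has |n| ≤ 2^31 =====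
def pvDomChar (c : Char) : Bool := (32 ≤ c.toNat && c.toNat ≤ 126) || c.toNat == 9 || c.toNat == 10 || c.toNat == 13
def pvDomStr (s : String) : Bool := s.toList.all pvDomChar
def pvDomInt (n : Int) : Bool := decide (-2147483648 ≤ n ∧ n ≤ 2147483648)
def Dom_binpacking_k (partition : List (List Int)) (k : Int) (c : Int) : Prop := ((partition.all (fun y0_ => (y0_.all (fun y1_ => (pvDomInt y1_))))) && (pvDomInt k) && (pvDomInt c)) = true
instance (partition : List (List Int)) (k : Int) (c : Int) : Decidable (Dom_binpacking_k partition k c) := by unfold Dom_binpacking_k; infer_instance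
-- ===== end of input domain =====

-- B replaces A's per-element rescan of all k bins by an ascending list of (length, index)
-- pairs: pop the front, reinsert the updated pair (alternative data structure, same results).

-- ===== PORT A =====
def binpacking_k (partition : List (List Int)) (k : Int) (c : Int) : List (List Int) :=
  let bins := (PySem.List.pyRange 0 k 1).map (fun _ => ([] : List Int))
  partition.foldl (fun bins s =>
    let smallest : Int :=
      (PySem.List.pyRange 0 (k - 1) 1).foldl (fun smallest b =>
        if (PySem.List.pyGetD bins (b + 1) []).length < (PySem.List.pyGetD bins smallest []).length
        then b + 1 else smallest) 0
    -- bins[smallest] += s  (in-range under Pre_, where pySetD/pyGetD are exact)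
    PySem.List.pySetD bins smallest (PySem.List.pyGetD bins smallest [] ++ s)) bins

-- ===== PORT B =====
-- _insert_sorted: insert item into the ascending list (Python tuple '<' is the lex order)
def pvInsertSorted (order : List (Int × Int)) (item : Int × Int) : List (Int × Int) :=
  match order with
  | [] => [item]
  | x :: rest =>
    if x.1 < item.1 ∨ (x.1 = item.1 ∧ x.2 < item.2) then x :: pvInsertSorted rest item
    else item :: x :: rest

def binpacking_k_alt (partition : List (List Int)) (k : Int) (c : Int) : List (List Int) :=
  let n := k.toNat   -- range(k) is empty for k ≤ 0
  let bins := List.replicate n ([] : List Int)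
  let order := (List.range n).map (fun i : Nat => ((0 : Int), (i : Int)))
  let st := partition.foldl (fun (st : List (List Int) × List (Int × Int)) s =>
    match st.2 with
    | [] => st   -- Python's order.pop(0) raises IndexError here; excluded by Pre_
    | (ln, i) :: rest =>
      (st.1.set i.toNat (st.1.getD i.toNat [] ++ s),
       pvInsertSorted rest (ln + (s.length : Int), i))) (bins, order)
  st.1

-- ===== PRECONDITION & SPEC =====
-- Pre_ excludes only the inputs where BOTH programs raise IndexError: a nonempty partition with k ≤ 0.
def Pre_binpacking_k (partition : List (List Int)) (k : Int) (c : Int) : Prop :=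
  partition = [] ∨ 1 ≤ k
instance (partition : List (List Int)) (k : Int) (c : Int) : Decidable (Pre_binpacking_k partition k c) := by unfold Pre_binpacking_k; infer_instance

def pvWitness_binpacking_k : List (List Int) × Int × Int := ([[1, 2], [3], [4, 5, 6]], 2, 0)

def Spec_binpacking_k (partition : List (List Int)) (k : Int) (c : Int) (out : List (List Int)) : Prop := out = binpacking_k_alt partition k c
instance (partition : List (List Int)) (k : Int) (c : Int) (out : List (List Int)) : Decidable (Spec_binpacking_k partition k c out) := by unfold Spec_binpacking_k; infer_instance

-- ===== CLAIM (what is proved, stated in full; the proofs are below) =====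
def Claim_equal_binpacking_k : Prop := ∀ (partition : List (List Int)) (k : Int) (c : Int), Dom_binpacking_k partition k c → Pre_binpacking_k partition k c → Spec_binpacking_k partition k c (binpacking_k partition k c)

-- ===== LEMMAS AND PROOFS =====

-- the (length, index) pairs of the current bins, in index order
def pvPairs (bins : List (List Int)) : List (Int × Int) :=
  (List.range bins.length).map (fun i => (((bins.getD i []).length : Int), (i : Int)))

-- strict lexicographic order on pairs (the order pvInsertSorted keeps)
def pvLt (a b : Int × Int) : Prop := a.1 < b.1 ∨ (a.1 = b.1 ∧ a.2 < b.2)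

-- A's inner argmin loop, restated over Nat
def pvAmin (bins : List (List Int)) (t : Nat) : Nat :=
  (List.range t).foldl (fun m b =>
    if (bins.getD (b + 1) []).length < (bins.getD m []).length then b + 1 else m) 0

theorem pvAmin_spec (bins : List (List Int)) (t : Nat) :
    pvAmin bins t ≤ t
    ∧ (∀ j ≤ t, (bins.getD (pvAmin bins t) []).length ≤ (bins.getD j []).length)
    ∧ (∀ j ≤ t, (bins.getD j []).length = (bins.getD (pvAmin bins t) []).length → pvAmin bins t ≤ j) := by
  induction t with
  | zero =>
    simp [pvAmin]
  | succ t ih =>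
    have hstep : pvAmin bins (t + 1)
        = if (bins.getD (t + 1) []).length < (bins.getD (pvAmin bins t) []).length
          then t + 1 else pvAmin bins t := by
      simp [pvAmin, List.range_succ]
    obtain ⟨h1, h2, h3⟩ := ih
    rw [hstep]
    split_ifs with hc
    · refine ⟨le_refl _, ?_, ?_⟩
      · intro j hj
        rcases Nat.lt_or_ge j (t + 1) with hj' | hj'
        · exact le_trans (le_of_lt hc) (h2 j (by omega))
        · have : j = t + 1 := by omega
          subst this; exact le_refl _
      · intro j hj he
        rcases Nat.lt_or_ge j (t + 1) with hj' | hj'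
        · have := h2 j (by omega); omega
        · omega
    · refine ⟨by omega, ?_, ?_⟩
      · intro j hj
        rcases Nat.lt_or_ge j (t + 1) with hj' | hj'
        · exact h2 j (by omega)
        · have : j = t + 1 := by omega
          subst this; omega
      · intro j hj he
        rcases Nat.lt_or_ge j (t + 1) with hj' | hj'
        · exact h3 j (by omega) he
        · omega

theorem pvAmin_cast (bins : List (List Int)) (k : Int) :
    ((PySem.List.pyRange 0 (k - 1) 1).foldl (fun smallest b =>
        if (PySem.List.pyGetD bins (b + 1) []).length < (PySem.List.pyGetD bins smallest []).length
        then b + 1 else smallest) 0)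
    = ((pvAmin bins (k - 1).toNat : Nat) : Int) := by
  rw [PySem.List.pyRange_one]
  simp only [Int.sub_zero, List.foldl_map]
  unfold pvAmin
  generalize (k - 1).toNat = t
  suffices h : ∀ (l : List Nat) (m : Nat),
      l.foldl (fun (smallest : Int) (j : Nat) =>
        if (PySem.List.pyGetD bins ((0 : Int) + (j : Int) + 1) []).length < (PySem.List.pyGetD bins smallest []).length
        then (0 : Int) + (j : Int) + 1 else smallest) (m : Nat)
      = ((l.foldl (fun m b =>
          if (bins.getD (b + 1) []).length < (bins.getD m []).length then b + 1 else m) m : Nat) : Int) by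
    exact h (List.range t) 0
  intro l
  induction l with
  | nil => intro m; rfl
  | cons j rest ih =>
    intro m
    simp only [List.foldl_cons]
    have e1 : (0 : Int) + (j : Int) + 1 = ((j + 1 : Nat) : Int) := by push_cast; ring
    rw [e1, PySem.List.pyGetD_natCast, PySem.List.pyGetD_natCast]
    split_ifs with hc
    · exact ih (j + 1)
    · exact ih m

theorem pvInsertSorted_perm (order : List (Int × Int)) (item : Int × Int) :
    (pvInsertSorted order item).Perm (item :: order) := by
  induction order with
  | nil => simp [pvInsertSorted]
  | cons x rest ih =>
    simp only [pvInsertSorted]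
    split_ifs with h
    · exact ((ih.cons x).trans (List.Perm.swap _ _ _))
    · exact List.Perm.refl _

theorem pvInsertSorted_pairwise (order : List (Int × Int)) (item : Int × Int)
    (h : order.Pairwise pvLt) (hne : ∀ x ∈ order, x ≠ item) :
    (pvInsertSorted order item).Pairwise pvLt := by
  induction order with
  | nil => simp [pvInsertSorted]
  | cons x rest ih =>
    rcases List.pairwise_cons.mp h with ⟨hx, hrest⟩
    simp only [pvInsertSorted]
    split_ifs with hcond
    · refine List.pairwise_cons.mpr ⟨?_, ih hrest (fun y hy => hne y (List.mem_cons_of_mem _ hy))⟩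
      intro y hy
      have hy' := (pvInsertSorted_perm rest item).mem_iff.mp hy
      cases hy' with
      | head => exact hcond
      | tail _ h2 => exact hx y h2
    · have hxne : x ≠ item := hne x (List.mem_cons_self)
      have hlt : pvLt item x := by
        unfold pvLt
        have : x.1 ≠ item.1 ∨ x.2 ≠ item.2 := by
          by_contra hc; push Not at hc; exact hxne (Prod.ext hc.1 hc.2)
        push Not at hcond; omega
      refine List.pairwise_cons.mpr ⟨?_, h⟩
      intro y hy
      rcases List.mem_cons.mp hy with h1 | h2
      · subst h1; exact hlt
      · rcases hlt with hl | ⟨he, hl⟩ <;> rcases hx y h2 with hl2 | ⟨he2, hl2⟩ <;> unfold pvLt <;> omega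

theorem pvSet_perm {α : Type} (l : List α) (n : Nat) (b : α) (h : n < l.length) :
    (l.set n b).Perm (b :: l.eraseIdx n) := by
  induction l generalizing n with
  | nil => simp at h
  | cons x xs ih =>
    cases n with
    | zero => simp
    | succ m =>
      simp only [List.set_cons_succ, List.eraseIdx_cons_succ]
      exact ((ih m (by simpa using h)).cons x).trans (List.Perm.swap _ _ _)

theorem pvPairs_set (bins : List (List Int)) (m : Nat) (v : List Int) (h : m < bins.length) :
    pvPairs (bins.set m v) = (pvPairs bins).set m ((v.length : Int), (m : Int)) := by
  unfold pvPairs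
  apply List.ext_getElem
  · simp
  · intro i h1 h2
    simp only [List.length_map, List.length_range, List.length_set] at h1 h2
    have h1' : i < bins.length := by simpa using h1
    rw [List.getElem_map, List.getElem_range]
    rcases eq_or_ne i m with rfl | hne
    · rw [List.getElem_set_self (by simpa using h)]
      simp [List.getD, h]
    · rw [List.getElem_set_ne (by omega)]
      rw [List.getElem_map, List.getElem_range]
      congr 2
      simp [List.getD]
      rw [List.getElem?_set_ne (by omega)]

theorem pvHead_eq (order : List (Int × Int)) (P : List (Int × Int)) (M : Int × Int)
    (hp : order.Pairwise pvLt) (hperm : order.Perm P)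
    (hM : M ∈ P) (hmin : ∀ x ∈ P, x.1 > M.1 ∨ (x.1 = M.1 ∧ M.2 ≤ x.2)) :
    ∃ rest, order = M :: rest := by
  have hM' : M ∈ order := hperm.mem_iff.mpr hM
  cases order with
  | nil => simp at hM'
  | cons h rest =>
    rcases List.mem_cons.mp hM' with rfl | hMrest
    · exact ⟨rest, rfl⟩
    · exfalso
      have hlt : pvLt h M := (List.pairwise_cons.mp hp).1 M hMrest
      have hle := hmin h (hperm.mem_iff.mp List.mem_cons_self)
      unfold pvLt at hlt; omega

theorem pvMain (partition : List (List Int)) (k : Int) (hk : 1 ≤ k)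
    (bins : List (List Int)) (order : List (Int × Int))
    (hlen : bins.length = k.toNat)
    (hp : order.Pairwise pvLt) (hperm : order.Perm (pvPairs bins)) :
    partition.foldl (fun bins s =>
      let smallest : Int :=
        (PySem.List.pyRange 0 (k - 1) 1).foldl (fun smallest b =>
          if (PySem.List.pyGetD bins (b + 1) []).length < (PySem.List.pyGetD bins smallest []).length
          then b + 1 else smallest) 0
      PySem.List.pySetD bins smallest (PySem.List.pyGetD bins smallest [] ++ s)) bins
    = (partition.foldl (fun (st : List (List Int) × List (Int × Int)) s =>
        match st.2 with
        | [] => st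
        | (ln, i) :: rest =>
          (st.1.set i.toNat (st.1.getD i.toNat [] ++ s),
           pvInsertSorted rest (ln + (s.length : Int), i))) (bins, order)).1 := by
  induction partition generalizing bins order with
  | nil => rfl
  | cons s part ih =>
    rw [List.foldl_cons, List.foldl_cons]
    have hkn : (k - 1).toNat + 1 = k.toNat := by omega
    obtain ⟨ha1, ha2, ha3⟩ := pvAmin_spec bins ((k - 1).toNat)
    set t := (k - 1).toNat with ht
    set m := pvAmin bins t with hm
    have hmlt : m < bins.length := by omega
    have hlenP : (pvPairs bins).length = bins.length := by simp [pvPairs]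
    have hMP : ((((bins.getD m []).length : Int), (m : Int)) : Int × Int) ∈ pvPairs bins :=
      List.mem_map.mpr ⟨m, by simp [hmlt], rfl⟩
    have hmin : ∀ x ∈ pvPairs bins,
        x.1 > ((bins.getD m []).length : Int) ∨ (x.1 = ((bins.getD m []).length : Int) ∧ (m : Int) ≤ x.2) := by
      intro x hx
      obtain ⟨j, hj, rfl⟩ := List.mem_map.mp hx
      dsimp only
      have hj' : j < bins.length := by simpa using hj
      have hle := ha2 j (by omega)
      rcases Nat.lt_or_ge ((bins.getD m []).length) ((bins.getD j []).length) with hlt | hge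
      · left; exact_mod_cast hlt
      · have heq : (bins.getD j []).length = (bins.getD m []).length := by omega
        have hmj := ha3 j (by omega) heq
        right; exact ⟨by exact_mod_cast heq, by exact_mod_cast hmj⟩
    obtain ⟨rest, horder⟩ :=
      pvHead_eq order (pvPairs bins) (((bins.getD m []).length : Int), (m : Int)) hp hperm hMP hmin
    subst horder
    -- invariants for the tail
    have hPm : (pvPairs bins)[m]'(by omega) = (((bins.getD m []).length : Int), (m : Int)) := by
      simp [pvPairs, hmlt]
    have hPermM : (pvPairs bins).Perm
        ((((bins.getD m []).length : Int), (m : Int)) :: (pvPairs bins).eraseIdx m) := by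
      have h2 := pvSet_perm (pvPairs bins) m ((((bins.getD m []).length : Int), (m : Int))) (by omega)
      rw [← hPm] at h2 ⊢
      rwa [List.set_getElem_self] at h2
    have hrest : rest.Perm ((pvPairs bins).eraseIdx m) :=
      List.Perm.cons_inv (hperm.trans hPermM)
    have hitem2 : pvPairs (bins.set m (bins.getD m [] ++ s))
        = (pvPairs bins).set m (((bins.getD m []).length : Int) + (s.length : Int), (m : Int)) := by
      rw [pvPairs_set bins m _ hmlt]
      congr 2
      rw [List.length_append]
      push_cast; ring
    have hsndNodup : ((pvPairs bins).map Prod.snd).Nodup := by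
      unfold pvPairs
      rw [List.map_map]
      exact (List.nodup_range).map (fun a b h => by
        dsimp only [Function.comp] at h; exact_mod_cast h)
    have hneM : ∀ x ∈ rest, x ≠ ((((bins.getD m []).length : Int) + (s.length : Int), (m : Int)) : Int × Int) := by
      intro x hx hxe
      have hx' : x ∈ (pvPairs bins).eraseIdx m := hrest.mem_iff.mp hx
      have hnodup2 : (((((bins.getD m []).length : Int), (m : Int)) : Int × Int)
          :: (pvPairs bins).eraseIdx m).map Prod.snd |>.Nodup :=
        ((hPermM.symm).map Prod.snd).nodup_iff.mpr hsndNodup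
      simp only [List.map_cons, List.nodup_cons] at hnodup2
      exact hnodup2.1 (List.mem_map.mpr ⟨x, hx', by rw [hxe]⟩)
    have hp' := pvInsertSorted_pairwise rest _ (List.pairwise_cons.mp hp).2 hneM
    have hperm'' : (pvInsertSorted rest (((bins.getD m []).length : Int) + (s.length : Int), (m : Int))).Perm
        (pvPairs (bins.set m (bins.getD m [] ++ s))) := by
      rw [hitem2]
      refine (pvInsertSorted_perm rest _).trans ?_
      refine (List.Perm.cons _ hrest).trans ?_
      exact (pvSet_perm (pvPairs bins) m _ (by omega)).symm
    refine Eq.trans ?_ (ih (bins.set m (bins.getD m [] ++ s)) _ (by simp [hlen]) hp' hperm'')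
    congr 1
    show PySem.List.pySetD bins _ (PySem.List.pyGetD bins _ [] ++ s) = _
    rw [pvAmin_cast bins k, ← ht, ← hm, PySem.List.pySetD_natCast, PySem.List.pyGetD_natCast]

theorem pvInit_bins (k : Int) :
    (PySem.List.pyRange 0 k 1).map (fun _ => ([] : List Int)) = List.replicate k.toNat [] := by
  rw [PySem.List.pyRange_one, List.map_map]
  have : ((fun (_ : Int) => ([] : List Int)) ∘ fun (j : Nat) => (0 : Int) + j) = fun _ => [] := rfl
  rw [this]
  simp [List.map_const']

theorem pvInit_pairs (n : Nat) :
    pvPairs (List.replicate n ([] : List Int)) = (List.range n).map (fun i : Nat => ((0 : Int), (i : Int))) := by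
  unfold pvPairs
  rw [List.length_replicate]
  apply List.map_congr_left
  intro i hi
  simp [List.getD, List.mem_range.mp hi]

theorem pvInit_pairwise (n : Nat) :
    ((List.range n).map (fun i : Nat => ((0 : Int), (i : Int)))).Pairwise pvLt := by
  refine List.Pairwise.map _ ?_ (List.pairwise_lt_range)
  intro a b hab
  exact Or.inr ⟨rfl, by dsimp only; exact_mod_cast hab⟩

-- ===== VERDICT (by name: the statement is the Claim_ definition above) =====
theorem binpacking_k_spec : Claim_equal_binpacking_k := by
  intro partition k c _dom hpre
  unfold Spec_binpacking_k binpacking_k binpacking_k_alt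
  rcases hpre with rfl | hk
  · show (PySem.List.pyRange 0 k 1).map (fun _ => ([] : List Int)) = List.replicate k.toNat []
    exact pvInit_bins k
  · show partition.foldl _ ((PySem.List.pyRange 0 k 1).map (fun _ => ([] : List Int)))
      = (partition.foldl _ (List.replicate k.toNat ([] : List Int),
          (List.range k.toNat).map (fun i : Nat => ((0 : Int), (i : Int))))).1
    rw [pvInit_bins k]
    exact pvMain partition k hk _ _ (by simp) (pvInit_pairwise k.toNat)
      (by rw [pvInit_pairs k.toNat])
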